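-- pv_equiv track=rewrite | github.com/Adithya-hv/DSA | Midterm-2/problem-2.py | intuitiveApproach
-- ===== SOURCE A (Python) =====
-- def intuitiveApproach(A):
--     max = -100
--     for i in range(0, len(A)):
--         count = 1
--         curr = A[i]
--         for j in range(i+1, len(A)):
--             if (curr < A[j]):
--                 count += 1
--                 curr = A[j]
--         if (max < count):
--             max = count
--
--     return max
-- ===== SOURCE B (Python) =====
-- def intuitiveApproach(A):
--     # O(n) right-to-left monotonic stack: the stack holds the increasing-record
--     # chain of the processed suffix (top = leftmost record); the greedy count
--     # starting at x is 1 + (records of the suffix strictly greater than x).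
--     best = 0
--     stack = []
--     for x in reversed(A):
--         while stack and stack[-1] <= x:
--             stack.pop()
--         best = max(best, 1 + len(stack))
--         stack.append(x)
--     return best
-- ===== Notes on version B (the rewrite author's own statement) =====
-- stated objective: faster
-- what changed: Replaces the quadratic scan over all start indices by a single right-to-left pass with a monotonic stack holding the record chain of the processed suffix, so each greedy count is read off as 1 + stack depth after popping.
-- intended difference: On the empty list A returns its sentinel initializer -100 while B returns 0, the correct maximum count over zero starting indices. — e.g. on intuitiveApproach([]): A returns -100, B returns 0
import Mathlib
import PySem

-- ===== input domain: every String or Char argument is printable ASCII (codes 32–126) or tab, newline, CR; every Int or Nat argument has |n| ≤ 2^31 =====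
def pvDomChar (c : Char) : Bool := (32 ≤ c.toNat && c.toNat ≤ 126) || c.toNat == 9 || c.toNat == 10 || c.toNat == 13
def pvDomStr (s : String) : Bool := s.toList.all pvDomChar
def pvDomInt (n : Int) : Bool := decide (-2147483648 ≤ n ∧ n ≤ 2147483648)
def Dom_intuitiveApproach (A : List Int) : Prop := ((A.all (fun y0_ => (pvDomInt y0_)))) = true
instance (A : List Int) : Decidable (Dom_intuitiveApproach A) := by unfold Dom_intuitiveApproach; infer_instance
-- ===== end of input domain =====

-- B replaces A's quadratic all-start-indices scan by one right-to-left monotonic-stack pass (asymptotically faster).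


-- ===== PORT A =====
-- literal port of A: outer loop over i, inner greedy scan from i+1, running max initialised to -100
def intuitiveApproach (A : List Int) : Int :=
  (PySem.List.pyRange 0 A.length 1).foldl (fun mx i =>
    let r := (PySem.List.pyRange (i + 1) A.length 1).foldl
      (fun (cc : Int × Int) j =>
        let aj := PySem.List.pyGetD A j 0   -- A[j]; j is always in range here
        if cc.2 < aj then (cc.1 + 1, aj) else cc)
      (1, PySem.List.pyGetD A i 0)          -- (count, curr) with curr = A[i]
    if mx < r.1 then r.1 else mx) (-100)

-- ===== PORT B =====
-- the `while stack and stack[-1] <= x: stack.pop()` loop (stack head = Python's stack[-1])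
def popWhileLE (x : Int) : List Int → List Int
  | [] => []
  | t :: s => if t ≤ x then popWhileLE x s else t :: s

def intuitiveApproach_alt (A : List Int) : Int :=
  (A.reverse.foldl (fun (st : Int × List Int) x =>
    let s := popWhileLE x st.2
    (max st.1 (1 + (s.length : Int)), x :: s)) (0, ([] : List Int))).1

-- ===== PRECONDITION & SPEC =====
-- On the empty list A returns its sentinel initializer -100 while B returns 0, the correct maximum count over zero starting indices.
def D_intuitiveApproach (A : List Int) : Prop := A = []
instance (A : List Int) : Decidable (D_intuitiveApproach A) := by unfold D_intuitiveApproach; infer_instance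
def Spec_intuitiveApproach (A : List Int) (out : Int) : Prop := ¬ D_intuitiveApproach A → out = intuitiveApproach_alt A
instance (A : List Int) (out : Int) : Decidable (Spec_intuitiveApproach A out) := by unfold Spec_intuitiveApproach; infer_instance
def pvDiffWitness_intuitiveApproach : List Int := []
def pvDiffWitnessOut_intuitiveApproach : Int × Int := (-100, 0)

-- ===== CLAIM (what is proved, stated in full; the proofs are below) =====
def Claim_unchanged_intuitiveApproach : Prop := ∀ (A : List Int), Dom_intuitiveApproach A → Spec_intuitiveApproach A (intuitiveApproach A)
def Claim_changed_intuitiveApproach : Prop := Dom_intuitiveApproach (pvDiffWitness_intuitiveApproach) ∧ D_intuitiveApproach (pvDiffWitness_intuitiveApproach) ∧ intuitiveApproach (pvDiffWitness_intuitiveApproach) = pvDiffWitnessOut_intuitiveApproach.1 ∧ intuitiveApproach_alt (pvDiffWitness_intuitiveApproach) = pvDiffWitnessOut_intuitiveApproach.2 ∧ pvDiffWitnessOut_intuitiveApproach.1 ≠ pvDiffWitnessOut_intuitiveApproach.2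
def Claim_exact_intuitiveApproach : Prop := ∀ (A : List Int), Dom_intuitiveApproach A → D_intuitiveApproach A → intuitiveApproach A ≠ intuitiveApproach_alt A

-- ===== LEMMAS AND PROOFS =====

-- greedy count of further records of l above a current value c
def cnt : Int → List Int → Int
  | _, [] => 0
  | c, x :: l => if c < x then 1 + cnt x l else cnt c l

-- the list of A's per-start-index counts
def cnts : List Int → List Int
  | [] => []
  | x :: l => (1 + cnt x l) :: cnts l

-- the increasing-record chain of a list (B's stack contents, top first)
def recs : List Int → List Int
  | [] => []
  | x :: l => x :: popWhileLE x (recs l)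

theorem cnt_nonneg (l : List Int) (c : Int) : 0 ≤ cnt c l := by
  induction l generalizing c with
  | nil => simp [cnt]
  | cons x l ih =>
    simp only [cnt]
    split
    · linarith [ih x]
    · exact ih c

theorem inner_fold_cnt (l : List Int) (c k : Int) :
    (l.foldl (fun (cc : Int × Int) aj => if cc.2 < aj then (cc.1 + 1, aj) else cc) (k, c)).1
      = k + cnt c l := by
  induction l generalizing c k with
  | nil => simp [cnt]
  | cons x l ih =>
    simp only [List.foldl_cons, cnt]
    split
    · rw [ih]; ring
    · rw [ih]

theorem inner_range (A : List Int) (a : Nat) (init : Int × Int) :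
    (PySem.List.pyRange (a : Int) (A.length : Int) 1).foldl
      (fun (cc : Int × Int) j =>
        if cc.2 < PySem.List.pyGetD A j 0 then (cc.1 + 1, PySem.List.pyGetD A j 0) else cc) init
    = (A.drop a).foldl (fun cc aj => if cc.2 < aj then (cc.1 + 1, aj) else cc) init := by
  simpa using PySem.List.foldl_pyRange_pyGetD' A 0
    (fun (cc : Int × Int) aj => if cc.2 < aj then (cc.1 + 1, aj) else cc) init
    (a := (a : Int)) (Int.natCast_nonneg a)

theorem outer_fold_cnts (A : List Int) (k : Nat) (m : Int) :
    (PySem.List.pyRange (k : Int) A.length 1).foldl (fun mx i =>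
        let r := (PySem.List.pyRange (i + 1) A.length 1).foldl
          (fun (cc : Int × Int) j =>
            let aj := PySem.List.pyGetD A j 0
            if cc.2 < aj then (cc.1 + 1, aj) else cc)
          (1, PySem.List.pyGetD A i 0)
        if mx < r.1 then r.1 else mx) m
      = (cnts (A.drop k)).foldl (fun mx c => if mx < c then c else mx) m := by
  by_cases hk : k < A.length
  · have h1 : ((k : Int) + 1) = ((k + 1 : Nat) : Int) := by push_cast; ring
    rw [PySem.List.pyRange_one_cons (by exact_mod_cast hk), List.foldl_cons,
        List.drop_eq_getElem_cons hk]
    simp only [cnts, List.foldl_cons, h1]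
    rw [outer_fold_cnts A (k + 1)]
    congr 1
    rw [inner_range A (k + 1), inner_fold_cnt]
    have hget : PySem.List.pyGetD A (k : Int) 0 = A[k] := by
      simp [PySem.List.pyGetD_natCast, List.getD_eq_getElem?_getD, List.getElem?_eq_getElem hk]
    rw [hget]
  · rw [PySem.List.pyRange_one_eq_nil (by exact_mod_cast Nat.le_of_not_lt hk),
        List.drop_eq_nil_of_le (Nat.le_of_not_lt hk)]
    simp [cnts]
termination_by A.length - k

theorem pop_pop (x y : Int) (h : y ≤ x) (r : List Int) :
    popWhileLE x (popWhileLE y r) = popWhileLE x r := by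
  induction r with
  | nil => simp [popWhileLE]
  | cons t r ih =>
    simp only [popWhileLE]
    by_cases ht : t ≤ y
    · rw [if_pos ht, if_pos (le_trans ht h)]
      exact ih
    · rw [if_neg ht, popWhileLE]

theorem cnt_recs (l : List Int) (x : Int) :
    cnt x l = ((popWhileLE x (recs l)).length : Int) := by
  induction l generalizing x with
  | nil => simp [cnt, recs, popWhileLE]
  | cons y l ih =>
    simp only [cnt, recs, popWhileLE]
    by_cases h : x < y
    · rw [if_pos h, if_neg (not_le.mpr h)]
      simp only [List.length_cons]
      rw [ih y]
      push_cast
      ring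
    · rw [if_neg h, if_pos (not_lt.mp h), pop_pop x y (not_lt.mp h), ih x]

theorem foldl_max_comm (l : List Int) (a b : Int) :
    l.foldl max (max a b) = max (l.foldl max a) b := by
  induction l generalizing a with
  | nil => simp
  | cons x l ih => simp only [List.foldl_cons, max_right_comm a b x, ih]

theorem alt_foldr (A : List Int) :
    A.foldr (fun x (st : Int × List Int) =>
        let s := popWhileLE x st.2
        (max st.1 (1 + (s.length : Int)), x :: s)) (0, ([] : List Int))
      = ((cnts A).foldl max 0, recs A) := by
  induction A with
  | nil => simp [cnts, recs]
  | cons x A ih =>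
    simp only [List.foldr_cons, ih, cnts, recs, List.foldl_cons]
    refine Prod.ext ?_ rfl
    simp only
    rw [← cnt_recs, ← foldl_max_comm]

theorem ite_lt_eq_max (m c : Int) : (if m < c then c else m) = max m c := by
  split_ifs <;> omega

theorem main_eq (A : List Int) (h : A ≠ []) :
    intuitiveApproach A = intuitiveApproach_alt A := by
  obtain ⟨x, l, rfl⟩ := List.exists_cons_of_ne_nil h
  rw [intuitiveApproach_alt, List.foldl_reverse, alt_foldr]
  have hA := outer_fold_cnts (x :: l) 0 (-100)
  simp only [Nat.cast_zero, List.drop_zero] at hA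
  rw [intuitiveApproach, hA]
  simp only [cnts, List.foldl_cons]
  simp only [funext fun m => funext fun c => ite_lt_eq_max m c]
  congr 1
  have h1 : (0 : Int) ≤ cnt x l := cnt_nonneg l x
  omega

-- ===== VERDICT (by name: the statement is the Claim_ definition above) =====
theorem intuitiveApproach_spec : Claim_unchanged_intuitiveApproach := by
  intro A _ hD
  exact main_eq A hD

theorem intuitiveApproach_changed : Claim_changed_intuitiveApproach := by
  unfold Claim_changed_intuitiveApproach; decide

theorem intuitiveApproach_tight : Claim_exact_intuitiveApproach := by
  intro A _ hD
  subst hD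
  decide
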